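-- pv_equiv track=rewrite | github.com/ugufru/coco | src/spacewarp/sprite_rater.py | generate_pixels
-- ===== SOURCE A (Python) =====
-- def seed_to_dims(seed):
--     w_bits = (seed >> 6) & 3
--     h_bits = (seed >> 4) & 3
--     width = {0: 5, 1: 7, 2: 7, 3: 9}[w_bits]
--     height = 5 if h_bits < 2 else 7
--     return width, height
--
-- def generate_pixels(seed):
--     width, height = seed_to_dims(seed)
--     half_width = (width + 1) // 2
--     state = seed & 0xFF
--     pixels = set()
--     for row in range(height):
--         state = (state * 5 + 3) & 0xFF
--         for col in range(half_width):
--             if (state >> col) & 1: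
--                 pixels.add((col, row))
--                 mirror = width - 1 - col
--                 if mirror != col:
--                     pixels.add((mirror, row))
--     pixels.add((half_width - 1, height // 2))
--     return width, height, pixels
-- ===== SOURCE B (Python) =====
-- def seed_to_dims(seed):
--     w_bits = (seed >> 6) & 3
--     h_bits = (seed >> 4) & 3
--     width = {0: 5, 1: 7, 2: 7, 3: 9}[w_bits]
--     height = 5 if h_bits < 2 else 7
--     return width, height
--
-- def generate_pixels(seed):
--     width, height = seed_to_dims(seed)
--     half_width = (width + 1) // 2
--     base = seed & 0xFF
--     pix = []
--     for row in range(height):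
--         # closed form of the LCG: state after row+1 steps of s -> (5s+3) & 0xFF
--         p = pow(5, row + 1, 1024)
--         m = (p * base + 3 * ((p - 1) // 4)) % 256 & ((1 << half_width) - 1)
--         while m:
--             col = (m & -m).bit_length() - 1
--             m &= m - 1
--             pix.append((col, row))
--             mirror = width - 1 - col
--             if mirror != col:
--                 pix.append((mirror, row))
--     center = (half_width - 1, height // 2)
--     if center not in pix:
--         pix.append(center)
--     return width, height, set(pix)
-- ===== Notes on version B (the rewrite author's own statement) =====
-- stated objective: alternative
-- what changed: B replaces the sequential per-row LCG state update by its closed form computed with modular exponentiation, replaces the guarded column scan with set-insertion by lowest-set-bit extraction from the masked row state into a plain list, and appends the center pixel only after a membership test instead of relying on set.add dedup.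
import Mathlib
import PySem

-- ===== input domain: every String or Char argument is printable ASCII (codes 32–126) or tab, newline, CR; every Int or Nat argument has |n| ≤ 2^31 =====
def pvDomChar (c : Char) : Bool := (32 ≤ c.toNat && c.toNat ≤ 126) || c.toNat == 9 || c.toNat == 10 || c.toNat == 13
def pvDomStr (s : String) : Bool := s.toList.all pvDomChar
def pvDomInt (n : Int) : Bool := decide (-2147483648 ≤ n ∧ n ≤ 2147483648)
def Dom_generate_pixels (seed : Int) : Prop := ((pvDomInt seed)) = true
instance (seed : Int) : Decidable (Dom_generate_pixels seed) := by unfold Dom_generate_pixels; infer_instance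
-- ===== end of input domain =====

-- B replaces the sequential LCG state by its closed form (pow mod) and the guarded set-add
-- column scan by lowest-set-bit extraction into a plain list; same return value (alternative).

-- ===== PORT A =====
-- helper seed_to_dims, shared by both Pythons (B's module reuses it verbatim)
def seed_to_dims (seed : Int) : Int × Int :=
  let w_bits := PySem.Int.band (seed >>> (6 : Nat)) 3
  let h_bits := PySem.Int.band (seed >>> (4 : Nat)) 3
  -- {0:5,1:7,2:7,3:9}[w_bits]: w_bits is always in 0..3 (band with 3), so the key is present
  let width := PySem.Dict.getD (PySem.Dict.ofList [((0:Int),(5:Int)),(1,7),(2,7),(3,9)]) w_bits 0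
  let height : Int := if h_bits < 2 then 5 else 7
  (width, height)

-- the body of A after `width, height = seed_to_dims(seed)` and `state = seed & 0xFF`
def gpA_core (wh : Int × Int) (state0 : Int) : Int × Int × (List (Int × Int)) :=
  let width := wh.1
  let height := wh.2
  let half_width := PySem.Int.floordiv (width + 1) 2
  let res := (PySem.List.pyRange 0 height 1).foldl
    (fun (st : Int × PySem.Set (Int × Int)) row =>
      let state := PySem.Int.band (st.1 * 5 + 3) 255
      let pixels := (PySem.List.pyRange 0 half_width 1).foldl
        (fun (pixels : PySem.Set (Int × Int)) col =>
          -- state >> col: col comes from range(half_width), col ≥ 0, so .toNat is exact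
          if PySem.Int.band (state >>> col.toNat) 1 ≠ 0 then
            let pixels := PySem.Set.add pixels (col, row)
            let mirror := width - 1 - col
            if mirror ≠ col then PySem.Set.add pixels (mirror, row) else pixels
          else pixels) st.2
      (state, pixels))
    (state0, (PySem.Set.empty : PySem.Set (Int × Int)))
  let pixels := PySem.Set.add res.2 (half_width - 1, PySem.Int.floordiv height 2)
  (width, height, pixels)

def generate_pixels (seed : Int) : Int × Int × (List (Int × Int)) :=
  gpA_core (seed_to_dims seed) (PySem.Int.band seed 255)

-- ===== PORT B =====
-- the `while m:` lowest-set-bit loop of B; fuel m.toNat is a totality guard only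
-- (each step clears one bit of m, so m.toNat steps always suffice)
def gpB_bits (width row : Int) : Nat → Int → List (Int × Int)
  | 0, _ => []
  | fuel + 1, m =>
    if m ≤ 0 then []
    else
      let col : Int := (PySem.Int.bitLength (PySem.Int.band m (-m)) : Int) - 1
      let m' := PySem.Int.band m (m - 1)
      let mirror := width - 1 - col
      (col, row) ::
        (if mirror ≠ col then (mirror, row) :: gpB_bits width row fuel m'
         else gpB_bits width row fuel m')

-- the body of B after `width, height = seed_to_dims(seed)` and `base = seed & 0xFF`
def gpB_core (wh : Int × Int) (base : Int) : Int × Int × (List (Int × Int)) :=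
  let width := wh.1
  let height := wh.2
  let half_width := PySem.Int.floordiv (width + 1) 2
  let pix := (PySem.List.pyRange 0 height 1).foldl
    (fun (pix : List (Int × Int)) row =>
      -- pow(5, row+1, 1024): row ≥ 0 from range(height), so .toNat is exact
      let p := PySem.Int.powMod 5 (row + 1).toNat 1024
      let m := PySem.Int.band
        (PySem.Int.mod (p * base + 3 * PySem.Int.floordiv (p - 1) 4) 256)
        ((1 <<< half_width.toNat) - 1)   -- half_width ≥ 0, so .toNat is exact
      pix ++ gpB_bits width row m.toNat m) []
  let center := (half_width - 1, PySem.Int.floordiv height 2)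
  let pix := if center ∈ pix then pix else pix ++ [center]
  (width, height, PySem.Set.ofList pix)

def generate_pixels_alt (seed : Int) : Int × Int × (List (Int × Int)) :=
  gpB_core (seed_to_dims seed) (PySem.Int.band seed 255)

-- ===== PRECONDITION & SPEC =====
def Spec_generate_pixels (seed : Int) (out : Int × Int × (List (Int × Int))) : Prop := out = generate_pixels_alt seed
instance (seed : Int) (out : Int × Int × (List (Int × Int))) : Decidable (Spec_generate_pixels seed out) := by unfold Spec_generate_pixels; infer_instance

-- ===== CLAIM (what is proved, stated in full; the proofs are below) =====
def Claim_equal_generate_pixels : Prop := ∀ (seed : Int), Dom_generate_pixels seed → Spec_generate_pixels seed (generate_pixels seed)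

-- ===== LEMMAS AND PROOFS =====
theorem pv_nat_and255 (n : Nat) : n &&& 255 = n % 256 := by
  have := Nat.and_two_pow_sub_one_eq_mod n 8; norm_num at this; omega

theorem pv_band255 (a : Int) : PySem.Int.band a 255 = a % 256 := by
  unfold PySem.Int.band
  split_ifs with h1 h2 h3 <;> try omega
  · rw [show ((255:Int).toNat = 255) from rfl, pv_nat_and255]; omega
  · rw [show ((255:Int).toNat = 255) from rfl, Nat.and_comm, pv_nat_and255]; omega

theorem pv_nat_and3 (n : Nat) : n &&& 3 = n % 4 := by
  have := Nat.and_two_pow_sub_one_eq_mod n 2; norm_num at this; omega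

theorem pv_band3 (a : Int) : PySem.Int.band a 3 = a % 4 := by
  unfold PySem.Int.band
  split_ifs with h1 h2 h3 <;> try omega
  · rw [show ((3:Int).toNat = 3) from rfl, pv_nat_and3]; omega
  · rw [show ((3:Int).toNat = 3) from rfl, Nat.and_comm, pv_nat_and3]; omega

theorem pv_wbits_red (a : Int) :
    PySem.Int.band (a >>> (6:Nat)) 3 = PySem.Int.band ((a % 256) >>> (6:Nat)) 3 := by
  rw [pv_band3, pv_band3, Int.shiftRight_eq_div_pow, Int.shiftRight_eq_div_pow]
  norm_num; omega

theorem pv_hbits_red (a : Int) :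
    PySem.Int.band (a >>> (4:Nat)) 3 = PySem.Int.band ((a % 256) >>> (4:Nat)) 3 := by
  rw [pv_band3, pv_band3, Int.shiftRight_eq_div_pow, Int.shiftRight_eq_div_pow]
  norm_num; omega

theorem pv_band255_red (a : Int) :
    PySem.Int.band a 255 = PySem.Int.band (a % 256) 255 := by
  rw [pv_band255, pv_band255]; omega

theorem pv_dims_red (seed : Int) : seed_to_dims seed = seed_to_dims (seed % 256) := by
  unfold seed_to_dims
  rw [pv_wbits_red, pv_hbits_red]

theorem pv_A_red (seed : Int) : generate_pixels seed = generate_pixels (seed % 256) := by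
  unfold generate_pixels
  rw [pv_dims_red, pv_band255_red]

theorem pv_B_red (seed : Int) : generate_pixels_alt seed = generate_pixels_alt (seed % 256) := by
  unfold generate_pixels_alt
  rw [pv_dims_red, pv_band255_red]

set_option maxHeartbeats 4000000 in
set_option maxRecDepth 8192 in
theorem pv_fin : ∀ r : Fin 256, generate_pixels (r.val : Int) = generate_pixels_alt (r.val : Int) := by
  decide

-- ===== VERDICT (by name: the statement is the Claim_ definition above) =====
theorem generate_pixels_spec : Claim_equal_generate_pixels := by
  intro seed _
  unfold Spec_generate_pixels
  rw [pv_A_red, pv_B_red]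
  have h256 : 0 ≤ seed % 256 ∧ seed % 256 < 256 := by omega
  have := pv_fin ⟨(seed % 256).toNat, by omega⟩
  simpa [Int.toNat_of_nonneg h256.1] using this
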